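-- pv_equiv track=rewrite | github.com/sadorno1/FitCheck | backend/services/vision.py | map_labels_to_tags
-- ===== SOURCE A (Python) =====
-- def map_labels_to_tags(labels):
--     type_map = {'shirt': 'top', 'jeans': 'bottom', 'jacket': 'outerwear', 'dress': 'dress'}
--     etiquette_map = {'pajamas': 'pajama', 'tuxedo': 'formal', 'sweatshirt': 'casual', 'blazer': 'professional'}
--     color_keywords = ['red', 'blue', 'white', 'black', 'green', 'yellow', 'beige', 'pink', 'brown', 'gray']
--     type = next((type_map[label] for label in labels if label in type_map), 'unknown')
--     etiquette = next((etiquette_map[label] for label in labels if label in etiquette_map), 'casual')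
--     color = next((label for label in labels if label in color_keywords), 'unknown')
--     gemini_prompt = f"The outfit includes: {', '.join(labels)}. Describe its vibe in 1 sentence."
--     return {
--         'type': type,
--         'etiquette': etiquette,
--         'color': color,
--         'gemini_prompt': gemini_prompt
--     }
-- ===== SOURCE B (Python) =====
-- def map_labels_to_tags(labels):
--     # Single pass over labels instead of three separate next(...) scans.
--     type_map = {'shirt': 'top', 'jeans': 'bottom', 'jacket': 'outerwear', 'dress': 'dress'}
--     etiquette_map = {'pajamas': 'pajama', 'tuxedo': 'formal', 'sweatshirt': 'casual', 'blazer': 'professional'}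
--     color_keywords = ['red', 'blue', 'white', 'black', 'green', 'yellow', 'beige', 'pink', 'brown', 'gray']
--     type = etiquette = color = None
--     for label in labels:
--         if type is None and label in type_map:
--             type = type_map[label]
--         if etiquette is None and label in etiquette_map:
--             etiquette = etiquette_map[label]
--         if color is None and label in color_keywords:
--             color = label
--     gemini_prompt = f"The outfit includes: {', '.join(labels)}. Describe its vibe in 1 sentence."
--     return {
--         'type': type if type is not None else 'unknown',
--         'etiquette': etiquette if etiquette is not None else 'casual',
--         'color': color if color is not None else 'unknown',
--         'gemini_prompt': gemini_prompt
--     }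
-- ===== Notes on version B (the rewrite author's own statement) =====
-- stated objective: alternative
-- what changed: Replaces the three separate next(...) generator scans over labels with a single for-loop that fills all three categories (first match per category) in one pass, substituting the defaults afterwards.
import Mathlib
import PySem

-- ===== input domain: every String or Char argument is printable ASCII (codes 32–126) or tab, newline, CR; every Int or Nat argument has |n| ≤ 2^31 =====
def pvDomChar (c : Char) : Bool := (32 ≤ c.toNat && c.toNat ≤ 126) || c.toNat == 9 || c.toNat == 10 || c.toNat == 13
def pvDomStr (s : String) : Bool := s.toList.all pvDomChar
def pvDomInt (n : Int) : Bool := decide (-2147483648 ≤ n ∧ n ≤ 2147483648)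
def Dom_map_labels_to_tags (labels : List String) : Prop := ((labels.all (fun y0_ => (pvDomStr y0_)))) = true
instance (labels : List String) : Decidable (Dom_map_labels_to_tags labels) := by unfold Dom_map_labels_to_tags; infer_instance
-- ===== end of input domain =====

-- B replaces A's three separate next(...) scans over labels with one pass filling all three categories; same result (alternative decomposition, not claimed faster).

-- ===== PORT A =====
def typeMapA : PySem.Dict String String :=
  PySem.Dict.ofList [("shirt", "top"), ("jeans", "bottom"), ("jacket", "outerwear"), ("dress", "dress")]
def etiquetteMapA : PySem.Dict String String :=
  PySem.Dict.ofList [("pajamas", "pajama"), ("tuxedo", "formal"), ("sweatshirt", "casual"), ("blazer", "professional")]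
def colorKeywordsA : List String :=
  ["red", "blue", "white", "black", "green", "yellow", "beige", "pink", "brown", "gray"]

-- next((m[label] for label in labels if label in m), dflt): first label that is a key of m, mapped through m
def pyNextDict (m : PySem.Dict String String) (dflt : String) : List String → String
  | [] => dflt
  | l :: ls => match m.get? l with
    | some v => v
    | none => pyNextDict m dflt ls

-- next((label for label in labels if label in kws), dflt)
def pyNextMem (kws : List String) (dflt : String) : List String → String
  | [] => dflt
  | l :: ls => if l ∈ kws then l else pyNextMem kws dflt ls

def map_labels_to_tags (labels : List String) : List (String × String) :=
  let type := pyNextDict typeMapA "unknown" labels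
  let etiquette := pyNextDict etiquetteMapA "casual" labels
  let color := pyNextMem colorKeywordsA "unknown" labels
  let gemini_prompt := "The outfit includes: " ++ PySem.Str.join ", " labels ++ ". Describe its vibe in 1 sentence."
  [("type", type), ("etiquette", etiquette), ("color", color), ("gemini_prompt", gemini_prompt)]

-- ===== PORT B =====
def typeMapB : PySem.Dict String String :=
  PySem.Dict.ofList [("shirt", "top"), ("jeans", "bottom"), ("jacket", "outerwear"), ("dress", "dress")]
def etiquetteMapB : PySem.Dict String String :=
  PySem.Dict.ofList [("pajamas", "pajama"), ("tuxedo", "formal"), ("sweatshirt", "casual"), ("blazer", "professional")]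
def colorKeywordsB : List String :=
  ["red", "blue", "white", "black", "green", "yellow", "beige", "pink", "brown", "gray"]

-- the single for-loop of B: fill each slot on its first match ('if <slot> is None and label in <map>')
def scanB : List String → Option String → Option String → Option String →
    Option String × Option String × Option String
  | [], t, e, c => (t, e, c)
  | l :: ls, t, e, c =>
      let t' := if t = none ∧ typeMapB.contains l = true then typeMapB.get? l else t
      let e' := if e = none ∧ etiquetteMapB.contains l = true then etiquetteMapB.get? l else e
      let c' := if c = none ∧ l ∈ colorKeywordsB then some l else c
      scanB ls t' e' c'

def map_labels_to_tags_alt (labels : List String) : List (String × String) :=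
  let (t, e, c) := scanB labels none none none
  let gemini_prompt := "The outfit includes: " ++ PySem.Str.join ", " labels ++ ". Describe its vibe in 1 sentence."
  [("type", t.getD "unknown"), ("etiquette", e.getD "casual"), ("color", c.getD "unknown"),
   ("gemini_prompt", gemini_prompt)]

-- ===== PRECONDITION & SPEC =====
def Spec_map_labels_to_tags (labels : List String) (out : List (String × String)) : Prop := out = map_labels_to_tags_alt labels
instance (labels : List String) (out : List (String × String)) : Decidable (Spec_map_labels_to_tags labels out) := by unfold Spec_map_labels_to_tags; infer_instance

-- ===== CLAIM (what is proved, stated in full; the proofs are below) =====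
def Claim_equal_map_labels_to_tags : Prop := ∀ (labels : List String), Dom_map_labels_to_tags labels → Spec_map_labels_to_tags labels (map_labels_to_tags labels)

-- ===== LEMMAS AND PROOFS =====

-- first key of m found in ls, as an option
def firstGet (m : PySem.Dict String String) : List String → Option String
  | [] => none
  | l :: ls => (m.get? l).or (firstGet m ls)

def firstMem (kws : List String) : List String → Option String
  | [] => none
  | l :: ls => (if l ∈ kws then some l else none).or (firstMem kws ls)

theorem pyNextDict_eq (m : PySem.Dict String String) (dflt : String) (ls : List String) :
    pyNextDict m dflt ls = (firstGet m ls).getD dflt := by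
  induction ls with
  | nil => rfl
  | cons l ls ih =>
      simp only [pyNextDict, firstGet]
      cases m.get? l <;> simp [ih]

theorem pyNextMem_eq (kws : List String) (dflt : String) (ls : List String) :
    pyNextMem kws dflt ls = (firstMem kws ls).getD dflt := by
  induction ls with
  | nil => rfl
  | cons l ls ih =>
      simp only [pyNextMem, firstMem]
      by_cases h : l ∈ kws <;> simp [h, ih]

theorem scanB_fst (ls : List String) : ∀ t e c : Option String,
    (scanB ls t e c).1 = t.or (firstGet typeMapB ls) := by
  induction ls with
  | nil => intro t e c; simp [scanB, firstGet]
  | cons l ls ih =>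
      intro t e c
      simp only [scanB, firstGet, ih]
      cases t with
      | some v => simp
      | none =>
          by_cases h : typeMapB.contains l = true
          · simp [h]
          · have hg : typeMapB.get? l = none := by
              have := PySem.Dict.contains_eq_isSome_get? (d := typeMapB) (k := l)
              rw [this] at h
              exact Option.not_isSome_iff_eq_none.mp h
            simp [h, hg]

theorem scanB_snd (ls : List String) : ∀ t e c : Option String,
    (scanB ls t e c).2.1 = e.or (firstGet etiquetteMapB ls) := by
  induction ls with
  | nil => intro t e c; simp [scanB, firstGet]
  | cons l ls ih =>
      intro t e c
      simp only [scanB, firstGet, ih]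
      cases e with
      | some v => simp
      | none =>
          by_cases h : etiquetteMapB.contains l = true
          · simp [h]
          · have hg : etiquetteMapB.get? l = none := by
              have := PySem.Dict.contains_eq_isSome_get? (d := etiquetteMapB) (k := l)
              rw [this] at h
              exact Option.not_isSome_iff_eq_none.mp h
            simp [h, hg]

theorem scanB_thd (ls : List String) : ∀ t e c : Option String,
    (scanB ls t e c).2.2 = c.or (firstMem colorKeywordsB ls) := by
  induction ls with
  | nil => intro t e c; simp [scanB, firstMem]
  | cons l ls ih =>
      intro t e c
      simp only [scanB, firstMem, ih]
      cases c with
      | some v => simp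
      | none => by_cases h : l ∈ colorKeywordsB <;> simp [h]

-- ===== VERDICT (by name: the statement is the Claim_ definition above) =====
theorem map_labels_to_tags_spec : Claim_equal_map_labels_to_tags := by
  intro labels _
  show map_labels_to_tags labels = map_labels_to_tags_alt labels
  have hA : typeMapA = typeMapB := rfl
  have hE : etiquetteMapA = etiquetteMapB := rfl
  have hC : colorKeywordsA = colorKeywordsB := rfl
  simp only [map_labels_to_tags, map_labels_to_tags_alt, scanB_fst, scanB_snd, scanB_thd,
    pyNextDict_eq, pyNextMem_eq, hA, hE, hC, Option.none_or]
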